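-- pv_equiv track=rewrite | github.com/yohi/docker-mcp-gateway-web-console | scripts/compare-test-results.py | diff_tests
-- ===== SOURCE A (Python) =====
-- from typing import Dict, Iterable, List, Tuple
--
-- FAIL_STATUSES = {"failed", "failure", "error", "timedout", "timedOut", "broken"}
--
-- def diff_tests(baseline: Dict[str, Dict[str, object]], updated: Dict[str, Dict[str, object]]) -> Tuple[List[str], List[str], List[str]]:
--     new_failures: List[str] = []
--     resolved: List[str] = []
--     flaky: List[str] = []
--
--     for test_id, base in baseline.items():
--         base_status = str(base.get("status", "")).lower()
--         updated_status = str(updated.get(test_id, {}).get("status", "")).lower()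
--
--         if base_status in FAIL_STATUSES and updated_status not in FAIL_STATUSES:
--             resolved.append(test_id)
--         if base_status not in FAIL_STATUSES and updated_status in FAIL_STATUSES:
--             new_failures.append(test_id)
--         if updated_status and base_status and base_status != updated_status:
--             flaky.append(test_id)
--
--     for test_id, upd in updated.items():
--         if test_id in baseline:
--             continue
--         if str(upd.get("status", "")).lower() in FAIL_STATUSES:
--             new_failures.append(test_id)
--
--     return sorted(set(new_failures)), sorted(set(resolved)), sorted(set(flaky))
-- ===== SOURCE B (Python) =====
-- FAIL_STATUSES = {"failed", "failure", "error", "timedout", "timedOut", "broken"}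
--
-- def diff_tests(baseline, updated):
--     def st(m, tid):
--         return str(m.get(tid, {}).get("status", "")).lower()
--     ids = sorted({*baseline, *updated})
--     new_failures = [t for t in ids
--                     if st(baseline, t) not in FAIL_STATUSES and st(updated, t) in FAIL_STATUSES]
--     resolved = [t for t in ids
--                 if st(baseline, t) in FAIL_STATUSES and st(updated, t) not in FAIL_STATUSES]
--     flaky = [t for t in ids
--              if st(baseline, t) and st(updated, t) and st(baseline, t) != st(updated, t)]
--     return new_failures, resolved, flaky
-- ===== Notes on version B (the rewrite author's own statement) =====
-- stated objective: simpler
-- what changed: Replaces A's two loops with per-branch appends and a final sorted(set(...)) dedup by one sorted union of the two key sets filtered by three uniform status predicates (missing keys read as the empty status), so no intermediate lists, no dedup and no baseline-membership skip are needed.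
import Mathlib
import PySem

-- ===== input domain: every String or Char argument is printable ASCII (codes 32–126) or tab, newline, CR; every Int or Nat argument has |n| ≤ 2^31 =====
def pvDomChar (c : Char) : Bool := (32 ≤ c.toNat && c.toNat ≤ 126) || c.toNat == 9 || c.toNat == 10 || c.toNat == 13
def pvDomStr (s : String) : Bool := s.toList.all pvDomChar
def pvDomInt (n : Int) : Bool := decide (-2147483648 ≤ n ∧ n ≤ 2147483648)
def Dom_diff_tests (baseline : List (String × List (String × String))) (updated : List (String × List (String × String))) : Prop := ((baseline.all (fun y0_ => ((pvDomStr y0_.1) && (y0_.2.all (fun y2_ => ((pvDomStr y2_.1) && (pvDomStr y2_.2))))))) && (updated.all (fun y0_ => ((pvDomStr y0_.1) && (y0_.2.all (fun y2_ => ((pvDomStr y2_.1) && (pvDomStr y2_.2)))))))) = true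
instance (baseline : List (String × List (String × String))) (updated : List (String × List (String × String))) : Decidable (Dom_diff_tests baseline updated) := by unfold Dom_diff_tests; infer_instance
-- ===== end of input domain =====

-- B replaces A's two append-loops plus final sorted(set(...)) dedup by a single sorted union of
-- the key sets filtered by three uniform predicates, with missing keys reading as the empty
-- status (objective: simpler). Equivalence of return values on maps with unique keys.

-- ===== PORT A =====
def pvFail : PySem.Set String :=
  PySem.Set.ofList ["failed", "failure", "error", "timedout", "timedOut", "broken"]

def diff_tests (baseline : List (String × List (String × String))) (updated : List (String × List (String × String))) : List String × List String × List String :=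
  -- first loop: for test_id, base in baseline.items()
  let acc1 : List String × List String × List String :=
    baseline.foldl (fun acc p =>
      let base_status := PySem.Str.lower ((PySem.Dict.mk p.2).getD "status" "")
      let updated_status := PySem.Str.lower ((PySem.Dict.mk ((PySem.Dict.mk updated).getD p.1 [])).getD "status" "")
      ((if !(PySem.Set.contains pvFail base_status) && PySem.Set.contains pvFail updated_status then acc.1 ++ [p.1] else acc.1),
       (if PySem.Set.contains pvFail base_status && !(PySem.Set.contains pvFail updated_status) then acc.2.1 ++ [p.1] else acc.2.1),
       (if !(updated_status == "") && !(base_status == "") && !(base_status == updated_status) then acc.2.2 ++ [p.1] else acc.2.2)))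
      ([], [], [])
  -- second loop: for test_id, upd in updated.items()
  let new_failures : List String :=
    updated.foldl (fun acc p =>
      if (PySem.Dict.mk baseline).contains p.1 then acc
      else if PySem.Set.contains pvFail (PySem.Str.lower ((PySem.Dict.mk p.2).getD "status" "")) then acc ++ [p.1]
      else acc) acc1.1
  (PySem.List.sorted (PySem.Set.ofList new_failures) (fun x => x) false,
   PySem.List.sorted (PySem.Set.ofList acc1.2.1) (fun x => x) false,
   PySem.List.sorted (PySem.Set.ofList acc1.2.2) (fun x => x) false)

-- ===== PORT B =====
-- helper st(m, tid) of Source B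
def pvStatusOf (m : List (String × List (String × String))) (tid : String) : String :=
  PySem.Str.lower ((PySem.Dict.mk ((PySem.Dict.mk m).getD tid [])).getD "status" "")

def diff_tests_alt (baseline : List (String × List (String × String))) (updated : List (String × List (String × String))) : List String × List String × List String :=
  let ids := PySem.List.sorted (PySem.Set.ofList (baseline.map Prod.fst ++ updated.map Prod.fst)) (fun x => x) false
  (ids.filter (fun t => !(PySem.Set.contains pvFail (pvStatusOf baseline t)) && PySem.Set.contains pvFail (pvStatusOf updated t)),
   ids.filter (fun t => PySem.Set.contains pvFail (pvStatusOf baseline t) && !(PySem.Set.contains pvFail (pvStatusOf updated t))),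
   ids.filter (fun t => !(pvStatusOf baseline t == "") && !(pvStatusOf updated t == "") && !(pvStatusOf baseline t == pvStatusOf updated t)))

-- ===== PRECONDITION & SPEC =====
-- Pre_ excludes association lists with duplicate keys (in either map): those do not represent
-- any Python dict, and A's per-occurrence iteration order there is accidental.
def Pre_diff_tests (baseline : List (String × List (String × String))) (updated : List (String × List (String × String))) : Prop :=
  (baseline.map Prod.fst).Nodup ∧ (updated.map Prod.fst).Nodup
instance (baseline : List (String × List (String × String))) (updated : List (String × List (String × String))) : Decidable (Pre_diff_tests baseline updated) := by unfold Pre_diff_tests; infer_instance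

def pvWitness_diff_tests : (List (String × List (String × String))) × (List (String × List (String × String))) :=
  ([("t1", [("status", "Failed")]), ("t2", [("status", "passed")])],
   [("t2", [("status", "error")]), ("t3", [("status", "broken")])])

def Spec_diff_tests (baseline : List (String × List (String × String))) (updated : List (String × List (String × String))) (out : List String × List String × List String) : Prop := out = diff_tests_alt baseline updated
instance (baseline : List (String × List (String × String))) (updated : List (String × List (String × String))) (out : List String × List String × List String) : Decidable (Spec_diff_tests baseline updated out) := by unfold Spec_diff_tests; infer_instance

-- ===== CLAIM (what is proved, stated in full; the proofs are below) =====
def Claim_equal_diff_tests : Prop := ∀ (baseline : List (String × List (String × String))) (updated : List (String × List (String × String))), Dom_diff_tests baseline updated → Pre_diff_tests baseline updated → Spec_diff_tests baseline updated (diff_tests baseline updated)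

-- ===== LEMMAS AND PROOFS =====

-- A loop writing into three independent append-accumulators is three filters.
theorem pv_triple_fold {α β : Type} (l : List α) (p q r : α → Bool) (f : α → β)
    (a b c : List β) :
    l.foldl (fun acc x =>
      ((if p x then acc.1 ++ [f x] else acc.1),
       (if q x then acc.2.1 ++ [f x] else acc.2.1),
       (if r x then acc.2.2 ++ [f x] else acc.2.2))) (a, b, c)
    = (a ++ (l.filter p).map f, b ++ (l.filter q).map f, c ++ (l.filter r).map f) := by
  induction l generalizing a b c with
  | nil => simp
  | cons x xs ih =>
    simp only [List.foldl_cons, List.filter_cons]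
    by_cases hp : p x <;> by_cases hq : q x <;> by_cases hr : r x <;>
      simp [hp, hq, hr, ih]

-- A loop with a 'continue' guard followed by a guarded append is one filter.
theorem pv_skip_fold {α β : Type} (l : List α) (c1 c2 : α → Bool) (f : α → β) (acc : List β) :
    l.foldl (fun acc x => if c1 x then acc else if c2 x then acc ++ [f x] else acc) acc
    = acc ++ (l.filter (fun x => !c1 x && c2 x)).map f := by
  induction l generalizing acc with
  | nil => simp
  | cons x xs ih =>
    simp only [List.foldl_cons, List.filter_cons]
    by_cases h1 : c1 x <;> by_cases h2 : c2 x <;> simp [h1, h2, ih]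

theorem pv_fail_empty : ("" : String) ∉ pvFail := by decide

theorem pv_nodup_filter_sorted_set {l : List String} (q : String → Bool) :
    ((PySem.List.sorted (PySem.Set.ofList l) (fun x => x) false).filter q).Nodup := by
  have h := PySem.List.sorted_ofList_pairwise_lt (xs := l)
  have h2 : (List.filter q (PySem.List.sorted (PySem.Set.ofList l) (fun x => x) false)).Pairwise (· < ·) := List.Pairwise.filter q h
  exact h2.imp (fun hlt => ne_of_lt hlt)

-- two nodup lists with the same members are permutations
theorem pv_perm_of_mem_iff {α : Type} [DecidableEq α] {l1 l2 : List α}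
    (h1 : l1.Nodup) (h2 : l2.Nodup) (h : ∀ x, x ∈ l1 ↔ x ∈ l2) : l1.Perm l2 := by
  rw [List.perm_iff_count]
  intro a
  rcases (h a) with ⟨hf, hb⟩
  by_cases ha : a ∈ l1
  · rw [List.count_eq_one_of_mem h1 ha, List.count_eq_one_of_mem h2 (hf ha)]
  · rw [List.count_eq_zero_of_not_mem ha, List.count_eq_zero_of_not_mem (fun hm => ha (hb hm))]

-- the canonical form: sorted(set L) equals filtering the sorted union key list by q,
-- provided membership in L is equivalent to (key of union ∧ q)
theorem pv_sorted_set_eq_filter (L K : List String) (q : String → Bool)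
    (h : ∀ t, t ∈ L ↔ (t ∈ K ∧ q t = true)) :
    PySem.List.sorted (PySem.Set.ofList L) (fun x => x) false
      = (PySem.List.sorted (PySem.Set.ofList K) (fun x => x) false).filter q := by
  apply PySem.List.sorted_eq_of_perm_of_pairwise_lt
  · apply pv_perm_of_mem_iff (pv_nodup_filter_sorted_set q) (PySem.Set.nodup_ofList L)
    intro t
    simp only [List.mem_filter, PySem.List.mem_sorted, PySem.Set.mem_ofList, h]
  · exact List.Pairwise.filter q (PySem.List.sorted_ofList_pairwise_lt (xs := K))

theorem pv_contains_mk {t : String} {m : List (String × List (String × String))} :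
    (PySem.Dict.mk m).contains t = decide (t ∈ m.map Prod.fst) := by
  rw [PySem.Dict.contains_eq_decide_mem_keys]
  simp [PySem.Dict.keys]

-- under nodup keys, the per-occurrence value in a loop over the items equals the dict lookup
theorem pv_getD_of_mem {p : String × List (String × String)}
    {m : List (String × List (String × String))}
    (hnd : (m.map Prod.fst).Nodup) (hp : p ∈ m) :
    (PySem.Dict.mk m).getD p.1 [] = p.2 := by
  apply PySem.Dict.getD_of_mem_items (k := p.1) (v := p.2)
  · simpa using hp
  · simpa [PySem.Dict.keys] using hnd

theorem pv_statusOf_of_mem {p : String × List (String × String)}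
    {m : List (String × List (String × String))}
    (hnd : (m.map Prod.fst).Nodup) (hp : p ∈ m) :
    pvStatusOf m p.1 = PySem.Str.lower ((PySem.Dict.mk p.2).getD "status" "") := by
  unfold pvStatusOf
  rw [pv_getD_of_mem hnd hp]

theorem pv_getD_mk_of_not_mem {t : String} {m : List (String × List (String × String))}
    (ht : t ∉ m.map Prod.fst) : (PySem.Dict.mk m).getD t ([] : List (String × String)) = [] := by
  induction m with
  | nil => rfl
  | cons p rest ih =>
    obtain ⟨k, v⟩ := p
    simp only [List.map_cons, List.mem_cons] at ht
    push Not at ht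
    rw [PySem.Dict.getD_eq_get?_getD, PySem.Dict.get?_mk_cons,
        if_neg (by simp [Ne.symm ht.1]), ← PySem.Dict.getD_eq_get?_getD]
    exact ih ht.2

theorem pv_statusOf_of_not_mem {t : String} {m : List (String × List (String × String))}
    (ht : t ∉ m.map Prod.fst) : pvStatusOf m t = "" := by
  unfold pvStatusOf
  rw [pv_getD_mk_of_not_mem ht]
  decide

-- ===== VERDICT (by name: the statement is the Claim_ definition above) =====
theorem diff_tests_spec : Claim_equal_diff_tests := by
  intro baseline updated _hdom hpre
  obtain ⟨hb, hu⟩ := hpre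
  simp only [Spec_diff_tests, diff_tests, diff_tests_alt]
  rw [pv_triple_fold, pv_skip_fold]
  simp only [List.nil_append]
  refine Prod.ext ?_ (Prod.ext ?_ ?_)
  · -- new_failures
    apply pv_sorted_set_eq_filter
    intro t
    constructor
    · intro hmem
      rcases List.mem_append.1 hmem with hmem | hmem
      · rcases List.mem_map.1 hmem with ⟨p, hpf, rfl⟩
        rcases List.mem_filter.1 hpf with ⟨hpm, hcond⟩
        refine ⟨List.mem_append.2 (Or.inl (List.mem_map.2 ⟨p, hpm, rfl⟩)), ?_⟩
        rw [pv_statusOf_of_mem hb hpm]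
        unfold pvStatusOf
        simpa using hcond
      · rcases List.mem_map.1 hmem with ⟨p, hpf, rfl⟩
        rcases List.mem_filter.1 hpf with ⟨hpm, hcond⟩
        simp only [pv_contains_mk, Bool.and_eq_true, Bool.not_eq_true', decide_eq_false_iff_not] at hcond
        refine ⟨List.mem_append.2 (Or.inr (List.mem_map.2 ⟨p, hpm, rfl⟩)), ?_⟩
        rw [pv_statusOf_of_not_mem hcond.1, pv_statusOf_of_mem hu hpm]
        have h2 : PySem.Str.lower ((PySem.Dict.mk p.2).getD "status" "") ∈ pvFail := by
          simpa using hcond.2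
        simp [h2, pv_fail_empty]
    · rintro ⟨hk, hq⟩
      by_cases hbmem : t ∈ baseline.map Prod.fst
      · rcases List.mem_map.1 hbmem with ⟨p, hpm, rfl⟩
        apply List.mem_append.2 (Or.inl _)
        refine List.mem_map.2 ⟨p, List.mem_filter.2 ⟨hpm, ?_⟩, rfl⟩
        rw [pv_statusOf_of_mem hb hpm] at hq
        unfold pvStatusOf at hq
        simpa using hq
      · have hum : t ∈ updated.map Prod.fst := by
          rcases List.mem_append.1 hk with h | h
          · exact absurd h hbmem
          · exact h
        rcases List.mem_map.1 hum with ⟨p, hpm, rfl⟩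
        apply List.mem_append.2 (Or.inr _)
        refine List.mem_map.2 ⟨p, List.mem_filter.2 ⟨hpm, ?_⟩, rfl⟩
        rw [pv_statusOf_of_mem hu hpm, pv_statusOf_of_not_mem hbmem] at hq
        simp [pv_fail_empty] at hq
        simp [hq]
        intro a b hab heq
        exact hbmem (heq ▸ List.mem_map.2 ⟨(a, b), hab, rfl⟩)
  · -- resolved
    apply pv_sorted_set_eq_filter
    intro t
    constructor
    · intro hmem
      rcases List.mem_map.1 hmem with ⟨p, hpf, rfl⟩
      rcases List.mem_filter.1 hpf with ⟨hpm, hcond⟩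
      refine ⟨List.mem_append.2 (Or.inl (List.mem_map.2 ⟨p, hpm, rfl⟩)), ?_⟩
      rw [pv_statusOf_of_mem hb hpm]
      unfold pvStatusOf
      simpa using hcond
    · rintro ⟨hk, hq⟩
      by_cases hbmem : t ∈ baseline.map Prod.fst
      · rcases List.mem_map.1 hbmem with ⟨p, hpm, rfl⟩
        refine List.mem_map.2 ⟨p, List.mem_filter.2 ⟨hpm, ?_⟩, rfl⟩
        rw [pv_statusOf_of_mem hb hpm] at hq
        unfold pvStatusOf at hq
        simpa using hq
      · rw [pv_statusOf_of_not_mem hbmem] at hq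
        simp only [Bool.and_eq_true] at hq
        exact absurd (by simpa using hq.1) pv_fail_empty
  · -- flaky
    apply pv_sorted_set_eq_filter
    intro t
    constructor
    · intro hmem
      rcases List.mem_map.1 hmem with ⟨p, hpf, rfl⟩
      rcases List.mem_filter.1 hpf with ⟨hpm, hcond⟩
      refine ⟨List.mem_append.2 (Or.inl (List.mem_map.2 ⟨p, hpm, rfl⟩)), ?_⟩
      rw [pv_statusOf_of_mem hb hpm]
      unfold pvStatusOf
      simp only [Bool.and_eq_true, Bool.not_eq_true', beq_eq_false_iff_ne, ne_eq] at hcond ⊢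
      tauto
    · rintro ⟨hk, hq⟩
      by_cases hbmem : t ∈ baseline.map Prod.fst
      · rcases List.mem_map.1 hbmem with ⟨p, hpm, rfl⟩
        refine List.mem_map.2 ⟨p, List.mem_filter.2 ⟨hpm, ?_⟩, rfl⟩
        rw [pv_statusOf_of_mem hb hpm] at hq
        unfold pvStatusOf at hq
        simp only [Bool.and_eq_true, Bool.not_eq_true', beq_eq_false_iff_ne, ne_eq] at hq ⊢
        tauto
      · rw [pv_statusOf_of_not_mem hbmem] at hq
        simp at hq
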